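-- pv_equiv track=rewrite | github.com/IlMinCho/Algorithm | swea/1242.py | code_status
-- ===== SOURCE A (Python) =====
-- def code_status(line):  # 너비와 끝점 찾는 함수
--     cnt, e = 0, -1  # 암호의 길이와 끝점, 유효하지 않은 끝점은 -1
--     current = '0'  # 암호를 확인하고 값을 저장
--     change = 0  # 네번 바뀌는지 파악하기 위한 변수
--     for j in range(len(line))[::-1]:
--         if current != line[j]:
--             if change == 4:  # 4번 바뀌면 종료
--                 break
--             change += 1
--             current = line[j]
--         if line[j] == '1':
--             if cnt == 0:
--                 e = j  # 끝 점 기억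
--             cnt += 1  # 1 개수 세기
--         if cnt and line[j] == '0':
--             cnt += 1  # 0 개수 세기
--     width = cnt // 7  # 7의 몇 배수인지 파악
--     if cnt % 7 != 0:  # 암호 코드가 7의 배수가 아닌 경우 무효 처리
--         return -1, -1
--     return e, width  # 끝점과 너비
-- ===== SOURCE B (Python) =====
-- def code_status(line):
--     e = line.rfind('1')
--     cnt = 0
--     i, runs = e, 0
--     while i >= 0 and runs < 4:
--         j = i
--         while j >= 0 and line[j] == line[i]:
--             j -= 1
--         cnt += i - j
--         i, runs = j, runs + 1
--     if cnt % 7 != 0: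
--         return -1, -1
--     return e, cnt // 7
-- ===== Notes on version B (the rewrite author's own statement) =====
-- stated objective: simpler
-- what changed: Replaces A's right-to-left per-character state machine (current/change counters with a break and per-character 0/1 counting) by a direct decomposition: rfind locates the barcode end and a short loop walks at most four runs of equal characters leftwards from it, summing their lengths; Pre_ restricts to the natural domain -- binary ('0'/'1') lines plus lines containing no '1' at all -- since on other lines A's window/count interplay over non-barcode characters is an accident of its implementation.
-- outside the precondition, e.g. on code_status('a00aaa1'): A returns (-1, -1), B returns (6, 1); on code_status('001aa1111'): A returns (8, 1), B returns (-1, -1)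
import Mathlib
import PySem

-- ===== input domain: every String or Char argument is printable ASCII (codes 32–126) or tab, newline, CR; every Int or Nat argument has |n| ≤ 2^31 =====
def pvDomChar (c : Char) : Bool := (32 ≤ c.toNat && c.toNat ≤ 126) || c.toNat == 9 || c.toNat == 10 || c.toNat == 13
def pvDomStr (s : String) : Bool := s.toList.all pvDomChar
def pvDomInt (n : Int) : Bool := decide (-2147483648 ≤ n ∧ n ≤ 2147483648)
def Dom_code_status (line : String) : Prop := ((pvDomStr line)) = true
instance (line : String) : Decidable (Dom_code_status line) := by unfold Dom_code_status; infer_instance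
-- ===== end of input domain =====

-- B replaces A's right-to-left per-character state machine (current/change counters with a break)
-- by a direct decomposition: find the barcode end with rfind, then walk at most four runs of equal
-- characters leftwards from it, summing their lengths; objective: simpler, same cost.
-- Pre_ restricts to the function's natural domain, binary strings.

-- ===== PORT A =====
-- the for-loop over range(len(line))[::-1] with its break; state (cnt, e, current, change)
def code_status_loop (s : List Char) : List Int → Int → Int → Char → Int → Int × Int
  | [], cnt, e, _current, _change => (cnt, e)
  | j :: js, cnt, e, current, change =>
    let c := PySem.List.pyGetD s j ' '   -- line[j]; every j the range produces is in bounds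
    if current ≠ c ∧ change = 4 then
      (cnt, e)  -- break
    else
      let change := if current ≠ c then change + 1 else change
      let current := if current ≠ c then c else current
      let e := if c = '1' ∧ cnt = 0 then j else e
      let cnt :=
        if c = '1' then cnt + 1
        else if cnt ≠ 0 ∧ c = '0' then cnt + 1 else cnt
      code_status_loop s js cnt e current change

def code_status (line : String) : Int × Int :=
  let s := line.toList
  -- range(len(line))[::-1]; a [::-1] slice never raises, so getD is exact here
  let idxs := (PySem.List.slice? (PySem.List.pyRange 0 (s.length : Int) 1) none none (-1)).getD []
  let r := code_status_loop s idxs 0 (-1) '0' 0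
  let cnt := r.1
  let e := r.2
  let width := PySem.Int.floordiv cnt 7
  if PySem.Int.mod cnt 7 ≠ 0 then (-1, -1) else (e, width)

-- ===== PORT B =====
-- inner while of Source B: 'while j >= 0 and line[j] == line[i]: j -= 1' (c = line[i]);
-- every index read is in range, so pyGetD is exact here
def code_status_alt_inner (s : List Char) (c : Char) (j : Int) : Int :=
  if _h : 0 ≤ j ∧ PySem.List.pyGetD s j ' ' = c then code_status_alt_inner s c (j - 1) else j
  termination_by (j + 1).toNat
  decreasing_by omega

-- outer while of Source B: 'while i >= 0 and runs < 4', one run per iteration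
def code_status_alt_outer (s : List Char) (i runs cnt : Int) : Int :=
  if h : 0 ≤ i ∧ runs < 4 then
    let j := code_status_alt_inner s (PySem.List.pyGetD s i ' ') i
    code_status_alt_outer s j (runs + 1) (cnt + (i - j))
  else cnt
  termination_by (4 - runs).toNat
  decreasing_by omega

def code_status_alt (line : String) : Int × Int :=
  let e := PySem.Str.rfind line "1"
  let cnt := code_status_alt_outer line.toList e 0 0
  if PySem.Int.mod cnt 7 ≠ 0 then (-1, -1)
  else (e, PySem.Int.floordiv cnt 7)

-- ===== PRECONDITION & SPEC =====
-- Pre_ restricts to the function's natural domain: binary barcode lines (only '0'/'1' characters),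
-- together with lines containing no '1' at all (no barcode: both programs trivially give (-1, 0)).
-- On other lines A's counting of only-'0'/'1' characters inside a window whose change counter is
-- driven by every character is accidental, and B does not reproduce it.
def Pre_code_status (line : String) : Prop :=
  line.toList.all (fun c => c == '0' || c == '1') = true ∨ line.toList.contains '1' = false
instance (line : String) : Decidable (Pre_code_status line) := by unfold Pre_code_status; infer_instance

def pvWitness_code_status : String := "0110100"

def Spec_code_status (line : String) (out : Int × Int) : Prop := out = code_status_alt line
instance (line : String) (out : Int × Int) : Decidable (Spec_code_status line out) := by unfold Spec_code_status; infer_instance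

-- ===== CLAIM (what is proved, stated in full; the proofs are below) =====
def Claim_equal_code_status : Prop := ∀ (line : String), Dom_code_status line → Pre_code_status line → Spec_code_status line (code_status line)

-- ===== LEMMAS AND PROOFS =====

-- A's scan rewritten structurally over the reversed character list (j is the current line index)
def pvAScan : List Char → Int → Int → Int → Char → Int → Int × Int
  | [], _, cnt, e, _, _ => (cnt, e)
  | c :: rest, j, cnt, e, current, change =>
    if current ≠ c ∧ change = 4 then (cnt, e)
    else
      pvAScan rest (j - 1)
        (if c = '1' then cnt + 1 else if cnt ≠ 0 ∧ c = '0' then cnt + 1 else cnt)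
        (if c = '1' ∧ cnt = 0 then j else e)
        (if current ≠ c then c else current)
        (if current ≠ c then change + 1 else change)

-- the same scan with the break already resolved away (runs over the scanned window only)
def pvScanNB : List Char → Int → Int → Int → Int × Int
  | [], _, cnt, e => (cnt, e)
  | c :: rest, j, cnt, e =>
    pvScanNB rest (j - 1)
      (if c = '1' then cnt + 1 else if cnt ≠ 0 ∧ c = '0' then cnt + 1 else cnt)
      (if c = '1' ∧ cnt = 0 then j else e)

-- length of the window A scans before breaking; b = remaining allowed changes (4 - change)
def pvW : List Char → Char → Nat → Nat
  | [], _, _ => 0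
  | c :: rest, cur, b =>
    if c = cur then 1 + pvW rest cur b
    else match b with
      | 0 => 0
      | b' + 1 => 1 + pvW rest c b'

-- run lengths of a character list
def pvRuns : List Char → List Int
  | [] => []
  | c :: rest =>
    let m := (rest.takeWhile (fun d => d = c)).length
    ((m : Int) + 1) :: pvRuns (rest.drop m)
  termination_by l => l.length
  decreasing_by simp

theorem pv_loop_eq_aScan (s : List Char) (k : Nat) (hk : k ≤ s.length)
    (cnt e : Int) (cur : Char) (ch : Int) :
    code_status_loop s ((PySem.List.pyRange 0 (k : Int) 1).reverse) cnt e cur ch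
      = pvAScan ((s.take k).reverse) ((k : Int) - 1) cnt e cur ch := by
  induction k generalizing cnt e cur ch with
  | zero =>
    have h0 : PySem.List.pyRange 0 ((0:Nat):Int) 1 = [] := by
      simp [PySem.List.pyRange]
    rw [h0]
    simp [code_status_loop, pvAScan]
  | succ k ih =>
    have hklt : k < s.length := hk
    have h1 : PySem.List.pyRange 0 (((k+1 : Nat)) : Int) 1
        = PySem.List.pyRange 0 (k : Int) 1 ++ [(k : Int)] := by
      push_cast
      exact PySem.List.pyRange_one_succ_right (by positivity)
    have hc : PySem.List.pyGetD s ((k : Nat) : Int) ' ' = s[k] := by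
      rw [PySem.List.pyGetD_natCast]
      exact List.getD_eq_getElem s ' ' hklt
    have htake : (s.take (k+1)).reverse = s[k] :: (s.take k).reverse := by
      rw [List.take_add_one, List.getElem?_eq_getElem hklt]
      simp
    have hj : (((k+1 : Nat)) : Int) - 1 = (k : Int) := by push_cast; ring
    rw [h1, List.reverse_append, htake, hj]
    simp only [List.reverse_cons, List.reverse_nil, List.nil_append, List.cons_append]
    simp only [code_status_loop, pvAScan, hc]
    by_cases hbrk : (cur ≠ s[k] ∧ ch = 4)
    · rw [if_pos hbrk, if_pos hbrk]
    · rw [if_neg hbrk, if_neg hbrk]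
      exact ih (Nat.le_of_succ_le hk) _ _ _ _

theorem pv_aScan_eq_scanNB (l : List Char) (j cnt e : Int) (cur : Char) (b : Nat) :
    pvAScan l j cnt e cur (4 - (b : Int)) = pvScanNB (l.take (pvW l cur b)) j cnt e := by
  induction l generalizing j cnt e cur b with
  | nil => simp [pvAScan, pvScanNB, pvW]
  | cons c rest ih =>
    by_cases hc : c = cur
    · subst hc
      have hW : pvW (c :: rest) c b = 1 + pvW rest c b := by simp [pvW]
      rw [hW, Nat.add_comm 1 (pvW rest c b), List.take_succ_cons]
      simp only [pvAScan, pvScanNB, ne_eq, not_true_eq_false, false_and, if_false, ite_self]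
      exact ih _ _ _ _ _
    · cases b with
      | zero =>
        have hW : pvW (c :: rest) cur 0 = 0 := by simp [pvW, hc]
        rw [hW]
        simp only [List.take_zero, pvScanNB]
        have hcond : (¬cur = c ∧ (4:Int) - ((0:Nat):Int) = 4) := by
          refine ⟨fun h => hc h.symm, by norm_num⟩
        simp [pvAScan, hcond]
      | succ b' =>
        have hW : pvW (c :: rest) cur (b'+1) = 1 + pvW rest c b' := by simp [pvW, hc]
        rw [hW, Nat.add_comm 1 (pvW rest c b'), List.take_succ_cons]
        have hne : ¬(¬cur = c ∧ (4:Int) - ((b'+1:Nat)) = 4) := by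
          rintro ⟨-, h⟩
          push_cast at h
          omega
        simp only [pvAScan, pvScanNB, ne_eq, if_neg hne]
        have hch : (4:Int) - ((b'+1:Nat)) + 1 = 4 - (b' : Int) := by push_cast; ring
        have hcur : (if ¬cur = c then c else cur) = c := by
          rw [if_pos (fun h => hc h.symm)]
        have hchg : (if ¬cur = c then (4:Int) - ((b'+1:Nat)) + 1 else 4 - ((b'+1:Nat)))
            = 4 - (b' : Int) := by
          rw [if_pos (fun h => hc h.symm), hch]
        rw [hcur, hchg]
        exact ih _ _ _ _ _

theorem pv_scanNB_pos (l : List Char) (j cnt e : Int) (h : 1 ≤ cnt) :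
    pvScanNB l j cnt e = (cnt + (l.countP (fun c => decide (c = '0' ∨ c = '1')) : Int), e) := by
  revert h
  induction l generalizing j cnt e with
  | nil => intro h; simp [pvScanNB]
  | cons c rest ih =>
    intro h
    have hcnt0 : ¬ cnt = 0 := by omega
    simp only [pvScanNB]
    rw [ih _ _ _ (by split_ifs <;> omega)]
    have he : (if c = '1' ∧ cnt = 0 then j else e) = e := by simp [hcnt0]
    rw [he, List.countP_cons]
    by_cases h1 : c = '1'
    · rw [if_pos h1, if_pos (by simp [h1])]
      simp only [Prod.mk.injEq, and_true]
      push_cast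
      ring
    · by_cases h0 : c = '0'
      · rw [if_neg h1, if_pos ⟨hcnt0, h0⟩, if_pos (by simp [h0])]
        simp only [Prod.mk.injEq, and_true]
        push_cast
        ring
      · rw [if_neg h1, if_neg (by simp [h0]), if_neg (by simp [h0, h1])]
        simp

theorem pv_scanNB_zero (l : List Char) (j e : Int) :
    pvScanNB l j 0 e =
      match l.findIdx? (fun c => decide (c = '1')) with
      | none => (0, e)
      | some p => (((l.drop p).countP (fun c => decide (c = '0' ∨ c = '1')) : Int), j - (p : Int)) := by
  induction l generalizing j with
  | nil => simp [pvScanNB]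
  | cons c rest ih =>
    by_cases h1 : c = '1'
    · subst h1
      have h01 : pvScanNB ('1' :: rest) j 0 e = pvScanNB rest (j - 1) 1 j := by
        simp [pvScanNB]
      rw [h01, pv_scanNB_pos rest (j-1) 1 j (le_refl 1)]
      simp [List.findIdx?_cons, Prod.ext_iff]
      omega
    · have h01 : pvScanNB (c :: rest) j 0 e = pvScanNB rest (j - 1) 0 e := by
        simp [pvScanNB, h1]
      rw [h01, ih]
      rw [List.findIdx?_cons]
      simp only [h1, decide_false, Bool.false_eq_true, if_false]
      cases hf : rest.findIdx? (fun c => decide (c = '1')) with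
      | none => simp
      | some p =>
        simp only [Option.map_some, List.drop_succ_cons]
        have hj2 : j - 1 - (p : Int) = j - (((p+1) : Nat) : Int) := by push_cast; ring
        rw [hj2]

theorem pv_W_runs (l : List Char) (cur : Char) (b : Nat) :
    ((pvW l cur b : Nat) : Int)
      = ((pvRuns l).take (if l.head? = some cur then b + 1 else b)).sum := by
  induction l using pvRuns.induct generalizing cur b with
  | case1 => simp [pvW, pvRuns]
  | case2 c rest m ih =>
    have hall : ∀ d ∈ rest.takeWhile (fun d => d = c), d = c := by
      intro d hd
      have := List.mem_takeWhile_imp hd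
      simpa using this
    have hdw : rest.drop m = rest.dropWhile (fun d => d = c) := by
      conv_lhs => rw [← List.takeWhile_append_dropWhile (p := fun d => (d = c : Bool)) (l := rest)]
      exact List.drop_left
    have hsplit : rest.takeWhile (fun d => d = c) ++ rest.drop m = rest := by
      rw [hdw]
      exact List.takeWhile_append_dropWhile
    have hWrun : ∀ b', pvW rest c b' = m + pvW (rest.drop m) c b' := by
      intro b'
      conv_lhs => rw [← hsplit]
      have hgen : ∀ (pre tl : List Char) b'', (∀ d ∈ pre, d = c) →
          pvW (pre ++ tl) c b'' = pre.length + pvW tl c b'' := by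
        intro pre
        induction pre with
        | nil => intro tl b'' _; simp
        | cons d pre' ihp =>
          intro tl b'' hp
          have hd : d = c := hp d (by simp)
          subst hd
          simp only [List.cons_append, pvW, if_true,
            ihp tl b'' (fun x hx => hp x (by simp [hx])), List.length_cons]
          omega
      exact hgen _ _ b' hall
    have hhead : ∀ x, (rest.drop m).head? = some x → ¬ x = c := by
      intro x hx hxc
      rw [hdw] at hx
      have hnp := List.head?_dropWhile_not (p := fun d => (d = c : Bool)) (l := rest)
      rw [hx] at hnp
      simp at hnp
      exact hnp hxc
    have hruns : pvRuns (c :: rest)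
        = ((m : Int) + 1) :: pvRuns (rest.drop m) := by
      rw [pvRuns]
    have htail : ∀ b', ((pvRuns (rest.drop m)).take b').sum
        = ((pvW (rest.drop m) c b' : Nat) : Int) := by
      intro b'
      rw [ih c b']
      cases hh : (rest.drop m).head? with
      | none => rfl
      | some x =>
        have := hhead x hh
        simp [this]
    by_cases hc : c = cur
    · subst hc
      have hW : pvW (c :: rest) c b = 1 + pvW rest c b := by simp [pvW]
      rw [hW, hruns]
      simp only [List.head?_cons, if_true]
      rw [List.take_succ_cons, List.sum_cons, hWrun b, htail b]
      push_cast
      ring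
    · rw [hruns]
      simp only [List.head?_cons, Option.some.injEq, if_neg hc]
      cases b with
      | zero => simp [pvW, hc]
      | succ b' =>
        have hW : pvW (c :: rest) cur (b'+1) = 1 + pvW rest c b' := by simp [pvW, hc]
        rw [hW, List.take_succ_cons, List.sum_cons, hWrun b', htail b']
        push_cast
        ring

theorem pv_findIdx?_take {α : Type} (pred : α → Bool) (l : List α) (w : Nat) :
    (l.take w).findIdx? pred =
      match l.findIdx? pred with
      | none => none
      | some p => if p < w then some p else none := by
  induction l generalizing w with
  | nil =>
    simp only [List.take_nil, List.findIdx?_nil]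
  | cons c rest ih =>
    cases w with
    | zero =>
      simp only [List.take_zero, List.findIdx?_nil, List.findIdx?_cons]
      split_ifs <;> cases hf : rest.findIdx? pred <;> simp
    | succ w' =>
      rw [List.take_succ_cons, List.findIdx?_cons, List.findIdx?_cons]
      by_cases hp : pred c
      · simp [hp]
      · simp only [hp, Bool.false_eq_true, if_false]
        rw [ih]
        cases hf : rest.findIdx? pred with
        | none => simp
        | some p =>
          simp only [Option.map_some]
          by_cases hlt : p < w'
          · simp [hlt, Nat.succ_lt_succ hlt]
          · have hlt' : ¬ p + 1 < w' + 1 := by omega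
            simp [hlt, hlt']

theorem pvW_le_length (l : List Char) (cur : Char) (b : Nat) : pvW l cur b ≤ l.length := by
  induction l generalizing cur b with
  | nil => simp [pvW]
  | cons c rest ih =>
    by_cases hc : c = cur
    · simp only [pvW, if_pos hc, List.length_cons]
      have := ih cur b; omega
    · cases b with
      | zero => simp [pvW, hc]
      | succ b' =>
        simp only [pvW, if_neg hc, List.length_cons]
        have := ih c b'; omega

theorem pvRuns_take_sum_nonneg (l : List Char) (b : Nat) : 0 ≤ ((pvRuns l).take b).sum := by
  induction l using pvRuns.induct generalizing b with
  | case1 => simp [pvRuns]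
  | case2 c rest m ih =>
    have hrw : pvRuns (c :: rest) = ((m : Int) + 1) :: pvRuns (rest.drop m) := by
      rw [pvRuns]
    rw [hrw]
    cases b with
    | zero => simp
    | succ b' =>
      rw [List.take_succ_cons, List.sum_cons]
      have := ih b'
      have hm : (0:Int) ≤ (m:Int) := by positivity
      omega

theorem pv_isPrefixOf_one (l : List Char) :
    List.isPrefixOf ['1'] l = true ↔ l.head? = some '1' := by
  cases l with
  | nil => simp [List.isPrefixOf]
  | cons c rest =>
    rw [show List.isPrefixOf ['1'] (c :: rest)
        = (('1' == c) && List.isPrefixOf ([] : List Char) rest) from rfl]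
    rw [show List.isPrefixOf ([] : List Char) rest = true from rfl]
    simp only [Bool.and_true, beq_iff_eq, List.head?_cons, Option.some.injEq]
    exact eq_comm

theorem pv_go_zero (s sub : List Char) :
    PySem.Chars.rfind.go s sub 0 = if sub.isPrefixOf s then (0:Int) else -1 := rfl

theorem pv_go_succ (s sub : List Char) (j : Nat) :
    PySem.Chars.rfind.go s sub (j+1)
      = if sub.isPrefixOf (s.drop (j+1)) then ((j+1 : Nat) : Int)
        else PySem.Chars.rfind.go s sub j := rfl

theorem pv_go_none (s : List Char) (h : ∀ i : Nat, s[i]? ≠ some '1') (k : Nat) :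
    PySem.Chars.rfind.go s ['1'] k = -1 := by
  induction k with
  | zero =>
    rw [pv_go_zero]
    have hnp : ¬ List.isPrefixOf ['1'] s = true := by
      rw [pv_isPrefixOf_one]
      have := h 0
      rwa [← List.head?_drop (i := 0), List.drop_zero] at this
    simp only [hnp, Bool.false_eq_true, if_false]
  | succ j ih =>
    rw [pv_go_succ]
    have hnp : ¬ List.isPrefixOf ['1'] (s.drop (j+1)) = true := by
      rw [pv_isPrefixOf_one, List.head?_drop]
      exact h (j+1)
    simp only [hnp, Bool.false_eq_true, if_false]
    exact ih

theorem pv_go_max (s : List Char) (h : Nat) (h1 : s[h]? = some '1')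
    (h2 : ∀ i : Nat, h < i → s[i]? ≠ some '1') (d : Nat) :
    PySem.Chars.rfind.go s ['1'] (h + d) = (h : Int) := by
  induction d with
  | zero =>
    rw [Nat.add_zero]
    cases hh : h with
    | zero =>
      rw [pv_go_zero]
      have hp : List.isPrefixOf ['1'] s = true := by
        rw [pv_isPrefixOf_one, ← List.drop_zero (l := s), List.head?_drop]
        simpa [hh] using h1
      simp only [hp, if_true]
      simp [hh]
    | succ j =>
      rw [pv_go_succ]
      have hp : List.isPrefixOf ['1'] (s.drop (j+1)) = true := by
        rw [pv_isPrefixOf_one, List.head?_drop]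
        simpa [hh] using h1
      simp only [hp, if_true]
  | succ d ih =>
    have hshape : h + (d + 1) = (h + d) + 1 := by omega
    rw [hshape, pv_go_succ]
    have hnp : ¬ List.isPrefixOf ['1'] (s.drop (h + d + 1)) = true := by
      rw [pv_isPrefixOf_one, List.head?_drop]
      exact h2 (h + d + 1) (by omega)
    simp only [hnp, Bool.false_eq_true, if_false]
    exact ih

theorem pv_rfind_char (s : List Char) :
    PySem.Chars.rfind s ['1'] =
      match s.reverse.findIdx? (fun c => decide (c = '1')) with
      | none => (-1 : Int)
      | some p => ((s.length - 1 - p : Nat) : Int) := by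
  cases hf : s.reverse.findIdx? (fun c => decide (c = '1')) with
  | none =>
    have hnone : ∀ i : Nat, s[i]? ≠ some '1' := by
      intro i hi
      have hmem : '1' ∈ s := List.mem_of_getElem? hi
      have hmem' : '1' ∈ s.reverse := by simpa using hmem
      rw [List.findIdx?_eq_none_iff] at hf
      have := hf '1' hmem'
      simp at this
    exact pv_go_none s hnone s.length
  | some p =>
    rw [List.findIdx?_eq_some_iff_findIdx_eq] at hf
    obtain ⟨hplt, hpidx⟩ := hf
    have hplt' : p < s.length := by simpa using hplt
    have hrev1 : s.reverse[p]'hplt = '1' := by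
      have hg := List.findIdx_getElem (p := fun c => decide (c = '1')) (xs := s.reverse)
        (w := by rw [hpidx]; exact hplt)
      simp only [hpidx, decide_eq_true_eq] at hg
      exact hg
    have hrevlt : ∀ j : Nat, j < p → ∀ hj : j < s.reverse.length, s.reverse[j] ≠ '1' := by
      intro j hj hjl hc
      have hne := List.not_of_lt_findIdx (p := fun c => decide (c = '1')) (xs := s.reverse)
        (i := j) (by omega)
      simp only [decide_eq_false_iff_not] at hne
      exact hne hc
    have hh1 : s[s.length - 1 - p]? = some '1' := by
      have := List.getElem_reverse (l := s) (i := p) hplt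
      rw [List.getElem?_eq_getElem (by omega)]
      rw [this] at hrev1
      simpa using hrev1
    have hh2 : ∀ i : Nat, s.length - 1 - p < i → s[i]? ≠ some '1' := by
      intro i hi hc
      by_cases hin : i < s.length
      · rw [List.getElem?_eq_getElem hin] at hc
        have hj : s.length - 1 - i < p := by omega
        have hrevj : s.reverse[s.length - 1 - i]'(by simp; omega) = s[i]'hin := by
          rw [List.getElem_reverse]
          congr 1
          omega
        exact hrevlt _ hj (by simp; omega) (by rw [hrevj]; simpa using hc)
      · rw [List.getElem?_eq_none (by omega)] at hc
        simp at hc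
    have hlen : s.length = (s.length - 1 - p) + (p + 1) := by omega
    show PySem.Chars.rfind.go s ['1'] s.length = ((s.length - 1 - p : Nat) : Int)
    conv_lhs => rw [hlen]
    exact pv_go_max s _ hh1 hh2 (p+1)

theorem pv_bInner_eq (s : List Char) (c : Char) (k : Nat) (hk : k ≤ s.length) :
    code_status_alt_inner s c ((k : Int) - 1)
      = (k : Int) - 1 - (((s.take k).reverse.takeWhile (fun d => d = c)).length : Int) := by
  induction k with
  | zero =>
    rw [code_status_alt_inner]
    norm_num
  | succ k ih =>
    have hklt : k < s.length := hk
    have htake : (s.take (k+1)).reverse = s[k] :: (s.take k).reverse := by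
      rw [List.take_add_one, List.getElem?_eq_getElem hklt]
      simp
    have hcast : (((k+1 : Nat)) : Int) - 1 = (k : Int) := by push_cast; ring
    have hget : PySem.List.pyGetD s ((k : Nat) : Int) ' ' = s[k] := by
      rw [PySem.List.pyGetD_natCast]
      exact List.getD_eq_getElem s ' ' hklt
    rw [code_status_alt_inner, hcast, htake]
    by_cases hc : s[k] = c
    · rw [dif_pos ⟨by positivity, by rw [hget, hc]⟩]
      rw [ih (Nat.le_of_succ_le hk)]
      rw [List.takeWhile_cons, if_pos (by simp [hc])]
      simp only [List.length_cons]
      push_cast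
      ring
    · rw [dif_neg (by rw [hget]; exact fun hcon => hc hcon.2)]
      rw [List.takeWhile_cons, if_neg (by simp [hc])]
      simp

theorem pv_bOuter_eq (s : List Char) (b : Nat) (k : Nat) (hk : k ≤ s.length) (cnt : Int) :
    code_status_alt_outer s ((k : Int) - 1) (4 - (b : Int)) cnt
      = cnt + ((pvRuns ((s.take k).reverse)).take b).sum := by
  induction b generalizing k cnt with
  | zero =>
    rw [code_status_alt_outer]
    rw [dif_neg (by norm_num)]
    simp
  | succ b ih =>
    cases k with
    | zero =>
      rw [code_status_alt_outer]
      rw [dif_neg (by norm_num)]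
      simp [pvRuns]
    | succ k' =>
      have hk'lt : k' < s.length := hk
      have htake : (s.take (k'+1)).reverse = s[k'] :: (s.take k').reverse := by
        rw [List.take_add_one, List.getElem?_eq_getElem hk'lt]
        simp
      have hcast : (((k'+1 : Nat)) : Int) - 1 = (k' : Int) := by push_cast; ring
      have hget : PySem.List.pyGetD s ((k' : Nat) : Int) ' ' = s[k'] := by
        rw [PySem.List.pyGetD_natCast]
        exact List.getD_eq_getElem s ' ' hk'lt
      rw [hcast, code_status_alt_outer]
      rw [dif_pos ⟨by positivity, by push_cast; omega⟩]
      simp only [hget]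
      set m : Nat := (((s.take k').reverse).takeWhile (fun d => d = s[k'])).length with hm
      have hmle : m ≤ k' := by
        have h1 := (List.takeWhile_sublist
          (p := fun d => (d = s[k'] : Bool)) (l := (s.take k').reverse)).length_le
        have h2 : ((s.take k').reverse).length = k' := by
          simp [List.length_take, Nat.min_eq_left (Nat.le_of_lt hk'lt)]
        omega
      -- the inner loop strips exactly the rightmost run (length m + 1)
      have hinner : code_status_alt_inner s s[k'] ((k' : Int)) = (k' : Int) - ((m : Int) + 1) := by
        have h := pv_bInner_eq s s[k'] (k'+1) hk
        rw [htake, List.takeWhile_cons, if_pos (by simp), List.length_cons, ← hm] at h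
        rw [← hcast, h]
        push_cast
        ring
      rw [hinner]
      have hc1 : cnt + ((k' : Int) - ((k' : Int) - ((m : Int) + 1))) = cnt + ((m : Int) + 1) := by
        ring
      rw [hc1]
      have hc2 : (k' : Int) - ((m : Int) + 1) = (((k' - m : Nat)) : Int) - 1 := by
        push_cast; omega
      rw [hc2]
      have hc3 : 4 - (((b+1 : Nat)) : Int) + 1 = 4 - (b : Int) := by push_cast; ring
      rw [hc3, ih (k' - m) (by omega) (cnt + ((m : Int) + 1))]
      -- relate the remaining prefix to the runs of the full prefix
      have hdropeq : (s.take (k' - m)).reverse = ((s.take (k'+1)).reverse).drop (m+1) := by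
        have hlen1 : (s.take (k'+1)).length = k'+1 := by
          simp [List.length_take, Nat.min_eq_left (Nat.succ_le_of_lt hk'lt)]
        rw [List.drop_reverse, hlen1, List.take_take]
        congr 2
        omega
      have hruns : pvRuns ((s.take (k'+1)).reverse)
          = ((m : Int) + 1) :: pvRuns (((s.take (k'+1)).reverse).drop (m+1)) := by
        rw [htake, pvRuns, List.drop_succ_cons, ← hm]
      rw [hdropeq, hruns, List.take_succ_cons, List.sum_cons]
      ring

-- ===== VERDICT (by name: the statement is the Claim_ definition above) =====
theorem code_status_spec : Claim_equal_code_status := by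
  intro line _hdom hpre
  unfold Spec_code_status
  show code_status line = code_status_alt line
  have hone : ("1" : String).toList = ['1'] := by decide
  simp only [code_status, code_status_alt, PySem.List.slice?_none_none_neg_one, Option.getD_some,
    PySem.Str.rfind_eq, hone]
  have hA : code_status_loop line.toList
        ((PySem.List.pyRange 0 (line.toList.length : Int) 1).reverse) 0 (-1) '0' 0
      = pvScanNB (line.toList.reverse.take (pvW line.toList.reverse '0' 4))
          ((line.toList.length : Int) - 1) 0 (-1) := by
    have h1 := pv_loop_eq_aScan line.toList line.toList.length (le_refl _) 0 (-1) '0' 0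
    rw [List.take_length] at h1
    have h4 : (0 : Int) = 4 - ((4 : Nat) : Int) := by norm_num
    rw [h1, h4, pv_aScan_eq_scanNB]
  rw [hA, pv_scanNB_zero, pv_rfind_char]
  set s := line.toList with hs
  set n := s.length with hn
  set rev := s.reverse with hrev
  set W := pvW rev '0' 4 with hW
  rw [pv_findIdx?_take]
  cases hf : rev.findIdx? (fun c => decide (c = '1')) with
  | none =>
    -- no '1' anywhere: A gives cnt 0, e -1; B gives e -1 and an empty walk
    simp only []
    rw [code_status_alt_outer, dif_neg (by norm_num)]
  | some p =>
    have hbin : ∀ c ∈ rev, c = '0' ∨ c = '1' := by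
      intro c hc
      have hmem : c ∈ line.toList := by rwa [hrev, List.mem_reverse] at hc
      cases hpre with
      | inl hall =>
        have := List.all_eq_true.mp hall c hmem
        simpa using this
      | inr hno =>
        exfalso
        have h1 : '1' ∉ line.toList := by simpa using hno
        have hnone : rev.findIdx? (fun c => decide (c = '1')) = none := by
          rw [List.findIdx?_eq_none_iff]
          intro x hx
          simp only [decide_eq_false_iff_not]
          intro hx1
          subst hx1
          exact h1 (by rwa [hrev, List.mem_reverse] at hx)
        rw [hnone] at hf
        simp at hf
    rw [List.findIdx?_eq_some_iff_findIdx_eq] at hf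
    obtain ⟨hplt, hpidx⟩ := hf
    have hpn : p < n := by simpa [hn, hrev] using hplt
    have hrev1 : rev[p]'hplt = '1' := by
      have := List.findIdx_getElem (p := fun c => decide (c = '1')) (xs := rev)
        (w := hpidx ▸ hplt)
      simp only [decide_eq_true_eq] at this
      simpa [hpidx] using (hpidx ▸ this)
    have hrevlt : ∀ j : Nat, j < p → ∀ hj : j < rev.length, rev[j] = '0' := by
      intro j hj hjl
      have hne := List.not_of_lt_findIdx (p := fun c => decide (c = '1')) (xs := rev)
        (i := j) (by omega)
      simp only [decide_eq_false_iff_not] at hne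
      rcases hbin rev[j] (List.getElem_mem hjl) with h | h
      · exact h
      · exact absurd h hne
    -- split rev at p
    have htakep : rev.take p = List.replicate p '0' := by
      rw [List.eq_replicate_iff]
      refine ⟨by simp [List.length_take]; omega, ?_⟩
      intro b hb
      rw [List.mem_take_iff_getElem] at hb
      obtain ⟨i, hi, hbi⟩ := hb
      rw [← hbi]
      exact hrevlt i (by omega) _
    have hdrophead : (rev.drop p).head? = some '1' := by
      rw [List.head?_drop, List.getElem?_eq_getElem hplt, hrev1]
    -- S := B's count
    set S : Int := ((pvRuns (rev.drop p)).take 4).sum with hS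
    -- W = p + S
    have hWS : ((W : Nat) : Int) = (p : Int) + S := by
      rw [hW, pv_W_runs]
      cases hp0 : p with
      | zero =>
        have hhead : rev.head? = some '1' := by
          rw [← List.drop_zero (l := rev), ← hp0]
          exact hdrophead
        rw [hhead]
        simp only [Option.some.injEq, if_neg (by decide : ¬ ('1':Char) = '0')]
        rw [hS, hp0]
        simp
      | succ q =>
        subst hp0
        have hsplit : rev = List.replicate (q+1) '0' ++ rev.drop (q+1) := by
          conv_lhs => rw [← List.take_append_drop (q+1) rev, htakep]
        have hhead : rev.head? = some '0' := by
          rw [hsplit]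
          simp [List.replicate_succ]
        have hdw : (rev.drop (q+1)).takeWhile (fun d => d = '0') = [] := by
          cases hd : rev.drop (q+1) with
          | nil => simp
          | cons x xs =>
            rw [hd] at hdrophead
            simp only [List.head?_cons, Option.some.injEq] at hdrophead
            rw [List.takeWhile_cons, if_neg (by simp [hdrophead])]
        have hrep : (List.replicate q '0').takeWhile (fun d => d = '0')
            = List.replicate q '0' := by
          rw [List.takeWhile_eq_self_iff]
          intro a ha
          simp [List.eq_of_mem_replicate ha]
        have htw : ((List.replicate q '0' ++ rev.drop (q+1)).takeWhile (fun d => d = '0'))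
            = List.replicate q '0' := by
          rw [List.takeWhile_append, if_pos (by rw [hrep]), hdw, List.append_nil]
        have hrunssplit : pvRuns rev = (((q+1 : Nat)) : Int) :: pvRuns (rev.drop (q+1)) := by
          conv_lhs => rw [hsplit, List.replicate_succ, List.cons_append]
          rw [pvRuns, htw, List.length_replicate]
          have hdl : (List.replicate q '0' ++ rev.drop (q+1)).drop q = rev.drop (q+1) := by
            have h := List.drop_left (l₁ := List.replicate q '0') (l₂ := rev.drop (q+1))
            simpa using h
          rw [hdl]
          have hq : ((q : Int) + 1) = (((q+1 : Nat)) : Int) := by push_cast; ring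
          rw [hq]
        rw [hhead, if_pos rfl, hrunssplit, List.take_succ_cons, List.sum_cons, hS]
    have hSpos : 1 ≤ S := by
      have hdropne : rev.drop p ≠ [] := by
        intro hnil
        rw [hnil] at hdrophead
        simp at hdrophead
      obtain ⟨x, xs, hxs⟩ := List.exists_cons_of_ne_nil hdropne
      rw [hS, hxs, pvRuns, List.take_succ_cons, List.sum_cons]
      have h1 := pvRuns_take_sum_nonneg (xs.drop ((xs.takeWhile (fun d => d = x)).length)) 3
      have h2 : (0:Int) ≤ ((xs.takeWhile (fun d => d = x)).length : Int) := by positivity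
      omega
    have hpW : p < W := by
      have : ((p:Int)) < ((W:Nat):Int) := by omega
      exact_mod_cast this
    have hmatch : (match (match some p with
          | none => none
          | some p => if p < W then some p else none) with
        | none => ((0 : Int), (-1 : Int))
        | some p => (((((rev.take W).drop p).countP
              (fun c => decide (c = '0' ∨ c = '1')) : Nat) : Int), ((n : Int) - 1) - (p : Int)))
        = (((((rev.take W).drop p).countP
              (fun c => decide (c = '0' ∨ c = '1')) : Nat) : Int), ((n : Int) - 1) - (p : Int)) := by
      simp only [if_pos hpW]
    rw [hmatch]
    -- A's count: all characters of the window tail are counted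
    have hWrl : W ≤ rev.length := pvW_le_length rev '0' 4
    have hWn : W ≤ n := by
      have h := hWrl
      rw [hrev, List.length_reverse] at h
      exact h
    have hcntA : (((rev.take W).drop p).countP (fun c => decide (c = '0' ∨ c = '1')) : Int)
        = S := by
      have hlen : ((rev.take W).drop p).length = W - p := by
        rw [List.length_drop, List.length_take]
        omega
      have hcp : ((rev.take W).drop p).countP (fun c => decide (c = '0' ∨ c = '1'))
          = ((rev.take W).drop p).length := by
        rw [List.countP_eq_length]
        intro a ha
        have hmem : a ∈ rev := List.mem_of_mem_take (List.mem_of_mem_drop ha)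
        simpa using hbin a hmem
      rw [hcp, hlen]
      omega
    rw [hcntA]
    -- B's count via the run walk
    have hkeq : ((n - 1 - p : Nat) : Int) = ((n - p : Nat) : Int) - 1 := by omega
    have houter : code_status_alt_outer s ((n - 1 - p : Nat) : Int) 0 0 = S := by
      have h := pv_bOuter_eq s 4 (n - p) (by omega) 0
      have h4 : (4 : Int) - ((4:Nat) : Int) = 0 := by norm_num
      rw [h4] at h
      rw [hkeq, h, hS, zero_add]
      congr 2
      rw [hrev, List.drop_reverse, hn]
    rw [houter]
    -- the endpoints agree
    have he : ((n : Int) - 1) - (p : Int) = ((n - 1 - p : Nat) : Int) := by omega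
    rw [he]
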